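-- pv_equiv track=rewrite | github.com/AlanCoding/mystery-word | mystery_word.py | narrow_words
-- ===== SOURCE A (Python) =====
-- def display_word(word, charsGuessed):
--     """Gives string to print with hidden non-guessed letters"""
--     dispWord = ""
--     for char in word:
--         if char in charsGuessed:
--             dispWord += char.upper()
--         else:
--             dispWord += "_"
--     dispWord = " ".join(dispWord)
--     return dispWord
--
-- def dictFOM(dict):
--     """Figure of merit for difficultity of a dictionary"""
--     if len(dict) == 0:
--         return 0
--     else:
--         return len(dict)*len(dict[0])
--
-- def narrow_words(dict,charsGuessed):
--     """Gives subset dictionary to be more difficult"""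
--     dictDict = {}
--     for word in dict:
--         tag = display_word(word,charsGuessed)
--         if tag in dictDict:
--             dictDict[tag].append(word)
--         else:
--             dictDict[tag] = [word]
--     dictLargest = []
--     for dict in dictDict:
--         if dictFOM(dictDict[dict]) > dictFOM(dictLargest):
--             dictLargest = dictDict[dict]
--     return dictLargest
-- ===== SOURCE B (Python) =====
-- def display_word(word, charsGuessed):
--     """Gives string to print with hidden non-guessed letters"""
--     return " ".join(ch.upper() if ch in charsGuessed else "_" for ch in word)
--
-- def narrow_words(dict, charsGuessed):
--     """Gives subset dictionary to be more difficult"""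
--     # one pass: tag -> (count, representative first word)
--     info = {}
--     for w in dict:
--         t = display_word(w, charsGuessed)
--         c, rep = info.get(t, (0, w))
--         info[t] = (c + 1, rep)
--     # first tag (insertion order) strictly maximizing count * len(representative)
--     best_tag, best_score = None, 0
--     for t, (c, rep) in info.items():
--         s = c * len(rep)
--         if s > best_score:
--             best_tag, best_score = t, s
--     if best_tag is None:
--         return []
--     # second pass: the group is the words carrying the best tag, in original order
--     return [w for w in dict if display_word(w, charsGuessed) == best_tag]
-- ===== Notes on version B (the rewrite author's own statement) =====
-- stated objective: alternative
-- what changed: A builds a dict holding every word of every display-tag group and keeps the whole best group while scanning the dict; B keeps only a (count, first-word) summary per tag in one pass, picks the best tag by count*len(first word), then recovers the group with a second filtering pass over the word list.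
import Mathlib
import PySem

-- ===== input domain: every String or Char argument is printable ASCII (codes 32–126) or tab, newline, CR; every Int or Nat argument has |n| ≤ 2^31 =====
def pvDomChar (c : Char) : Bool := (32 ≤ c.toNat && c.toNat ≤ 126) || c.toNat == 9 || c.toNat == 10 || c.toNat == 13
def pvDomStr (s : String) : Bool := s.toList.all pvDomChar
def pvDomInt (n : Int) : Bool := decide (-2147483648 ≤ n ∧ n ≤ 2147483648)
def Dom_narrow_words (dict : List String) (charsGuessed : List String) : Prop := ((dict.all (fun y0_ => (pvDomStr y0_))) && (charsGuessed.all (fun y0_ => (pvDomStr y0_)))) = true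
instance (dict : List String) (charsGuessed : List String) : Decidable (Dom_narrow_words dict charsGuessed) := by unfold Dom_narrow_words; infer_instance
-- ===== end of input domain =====

-- B replaces A's dict-of-groups (keeping every word of every group) by a one-pass (count, first word)
-- summary per tag plus a second filtering pass over the word list; objective: alternative decomposition.

-- ===== PORT A =====
-- display_word: builds dispWord by string concatenation in a loop, then " ".join over its characters
def display_word (word : String) (charsGuessed : List String) : String :=
  let dispWord := word.toList.foldl (fun acc c =>
    if charsGuessed.contains (String.ofList [c]) then acc ++ PySem.Str.upper (String.ofList [c])
    else acc ++ "_") ""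
  PySem.Str.join " " (dispWord.toList.map (fun c => String.ofList [c]))

-- dictFOM: len(dict)*len(dict[0]); the index 0 is only reached when the list is nonempty, so pyGetD's
-- default "" is never used
def dictFOM (g : List String) : Int :=
  if g.length = 0 then 0
  else (g.length : Int) * PySem.Str.len (PySem.List.pyGetD g 0 "")

def narrow_words (dict : List String) (charsGuessed : List String) : List String :=
  let dictDict := dict.foldl (fun d word =>
    let tag := display_word word charsGuessed
    if d.contains tag then d.modify tag [] (fun g => g ++ [word])  -- dictDict[tag].append(word)
    else d.insert tag [word]) PySem.Dict.empty
  -- 'for dict in dictDict' iterates the keys; dictDict[dict] is a present-key lookup, ported as getD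
  dictDict.keys.foldl (fun dictLargest k =>
    if dictFOM (dictDict.getD k []) > dictFOM dictLargest then dictDict.getD k [] else dictLargest) []

-- ===== PORT B =====
def display_word_alt (word : String) (charsGuessed : List String) : String :=
  PySem.Str.join " " (word.toList.map (fun c =>
    if charsGuessed.contains (String.ofList [c]) then PySem.Str.upper (String.ofList [c]) else "_"))

def narrow_words_alt (dict : List String) (charsGuessed : List String) : List String :=
  let info := dict.foldl (fun d w =>
    let t := display_word_alt w charsGuessed
    let p := d.getD t ((0 : Int), w)
    d.insert t (p.1 + 1, p.2)) PySem.Dict.empty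
  let best := info.items.foldl (fun (best : Option String × Int) it =>
    let s := it.2.1 * PySem.Str.len it.2.2
    if s > best.2 then (some it.1, s) else best) (none, 0)
  match best.1 with
  | none => []
  | some t => dict.filter (fun w => display_word_alt w charsGuessed == t)

-- ===== PRECONDITION & SPEC =====
def Spec_narrow_words (dict : List String) (charsGuessed : List String) (out : List String) : Prop := out = narrow_words_alt dict charsGuessed
instance (dict : List String) (charsGuessed : List String) (out : List String) : Decidable (Spec_narrow_words dict charsGuessed out) := by unfold Spec_narrow_words; infer_instance

-- ===== CLAIM (what is proved, stated in full; the proofs are below) =====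
def Claim_equal_narrow_words : Prop := ∀ (dict : List String) (charsGuessed : List String), Dom_narrow_words dict charsGuessed → Spec_narrow_words dict charsGuessed (narrow_words dict charsGuessed)

-- ===== LEMMAS AND PROOFS =====

-- proof-only helpers
def keyf (charsGuessed : List String) (w : String) : String := display_word_alt w charsGuessed

def Grp (dict : List String) (charsGuessed : List String) (t : String) : List String :=
  dict.filter (fun w => display_word_alt w charsGuessed == t)

theorem dispA_toList (cg : List String) (cs : List Char) (s : String) :
    (cs.foldl (fun acc c =>
      if cg.contains (String.ofList [c]) then acc ++ PySem.Str.upper (String.ofList [c])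
      else acc ++ "_") s).toList
    = s.toList ++ cs.map (fun c =>
        if cg.contains (String.ofList [c]) then PySem.Chars.upperChar c else '_') := by
  induction cs generalizing s with
  | nil => simp
  | cons c cs ih =>
    simp only [List.foldl_cons, List.map_cons]
    by_cases h : cg.contains (String.ofList [c]) = true
    · rw [if_pos h, if_pos h, ih]
      simp [PySem.Chars.upper]
    · rw [if_neg h, if_neg h, ih]
      simp

theorem display_word_eq (word : String) (charsGuessed : List String) :
    display_word word charsGuessed = display_word_alt word charsGuessed := by
  apply String.toList_inj.mp
  simp only [display_word, display_word_alt, PySem.Str.toList_join, dispA_toList]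
  congr 1
  have : ("" : String).toList = [] := by simp
  rw [this, List.nil_append]
  simp only [List.map_map]
  apply List.map_congr_left
  intro c _
  simp only [Function.comp_def]
  by_cases h : charsGuessed.contains (String.ofList [c]) = true
  · rw [if_pos h, if_pos h]
    simp [PySem.Chars.upper]
  · rw [if_neg h, if_neg h]

-- A's grouping step is exactly a Python-dict `modify` (append with default [])
theorem stepA_eq (cg : List String) :
    (fun (d : PySem.Dict String (List String)) (word : String) =>
      let tag := display_word word cg
      if d.contains tag then d.modify tag [] (fun g => g ++ [word])
      else d.insert tag [word])
    = (fun d w => d.modify (keyf cg w) [] (fun g => g ++ [w])) := by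
  funext d w
  simp only [display_word_eq, keyf]
  by_cases h : d.contains (display_word_alt w cg) = true
  · rw [if_pos h]
  · rw [if_neg h, PySem.Dict.modify,
      PySem.Dict.getD_of_not_contains _ _ (Bool.eq_false_iff.mpr (by exact h)),
      List.nil_append]

theorem groupA (dict cg : List String) (t : String) :
    (dict.foldl (fun d w => d.modify (keyf cg w) [] (fun g => g ++ [w])) PySem.Dict.empty).getD t []
      = Grp dict cg t := by
  have h1 : dict.foldl (fun d w => d.modify (keyf cg w) [] (fun g => g ++ [w])) PySem.Dict.empty
      = (dict.map (fun w => (keyf cg w, w))).foldl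
          (fun d p => d.modify p.1 [] (fun g => g ++ [p.2])) PySem.Dict.empty := by
    rw [List.foldl_map]
  rw [h1, PySem.Dict.getD_foldl_modify_append, PySem.Dict.getD_empty, List.nil_append,
    List.filter_map, List.map_map]
  simp [Grp, Function.comp_def, keyf]

-- the step of B's info-building fold (named for reuse in proofs)
def stepB (cg : List String) (d : PySem.Dict String (Int × String)) (w : String) : PySem.Dict String (Int × String) :=
  let t := display_word_alt w cg
  let p := d.getD t ((0 : Int), w)
  d.insert t (p.1 + 1, p.2)

-- B's info dict: per tag, (count so far, first word seen with that tag)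
theorem infoB_get? (cg : List String) (l : List String) (d : PySem.Dict String (Int × String)) (t : String) :
    (l.foldl (stepB cg) d).get? t =
    match d.get? t with
    | some p => some (p.1 + ((l.filter (fun w => display_word_alt w cg == t)).length : Int), p.2)
    | none =>
      match l.filter (fun w => display_word_alt w cg == t) with
      | [] => none
      | w :: ws => some (((ws.length : Int)) + 1, w)
    := by
  induction l generalizing d with
  | nil => cases hd : d.get? t <;> simp [hd]
  | cons w l ih =>
    simp only [List.foldl_cons, List.filter_cons, stepB]
    by_cases h : display_word_alt w cg = t
    · have hb : (display_word_alt w cg == t) = true := by simp [h]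
      rw [hb, if_pos rfl, ih, h]
      cases hd : d.get? t with
      | some p =>
        rw [PySem.Dict.getD_of_get?_eq_some _ _ hd, PySem.Dict.get?_insert_self]
        simp only [List.length_cons]
        congr 2
        push_cast
        ring
      | none =>
        rw [PySem.Dict.getD_of_get?_eq_none _ _ hd, PySem.Dict.get?_insert_self]
        simp only []
        congr 2
        push_cast
        ring
    · have hb : (display_word_alt w cg == t) = false := by simp [h]
      rw [hb, if_neg (by simp), ih,
        PySem.Dict.get?_insert_of_ne _ _ (fun he => h he.symm)]


theorem nodup_infoB (dict cg : List String) :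
    (dict.foldl (stepB cg) PySem.Dict.empty).keys.Nodup := by
  exact PySem.Dict.nodup_keys_foldl_insert_key dict (fun w => display_word_alt w cg)
    (fun d w => ((d.getD (display_word_alt w cg) ((0 : Int), w)).1 + 1,
                 (d.getD (display_word_alt w cg) ((0 : Int), w)).2))
    PySem.Dict.empty PySem.Dict.nodup_keys_empty

theorem keysA_eq (dict cg : List String) :
    (dict.foldl (fun d w => d.modify (keyf cg w) [] (fun g => g ++ [w])) PySem.Dict.empty).keys
      = (dict.foldl (stepB cg) PySem.Dict.empty).keys := by
  rw [PySem.Dict.keys_foldl_modify_key dict (keyf cg) [] (fun _ x => fun g => g ++ [x]) PySem.Dict.empty]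
  have h2 : (dict.foldl (stepB cg) PySem.Dict.empty).keys
      = PySem.Set.update PySem.Dict.empty.keys (dict.map (fun w => display_word_alt w cg)) :=
    PySem.Dict.keys_foldl_insert_key dict (fun w => display_word_alt w cg)
      (fun d w => ((d.getD (display_word_alt w cg) ((0 : Int), w)).1 + 1,
                   (d.getD (display_word_alt w cg) ((0 : Int), w)).2)) PySem.Dict.empty
  rw [h2]
  rfl

theorem itemsB_spec (dict cg : List String) (it : String × (Int × String))
    (hit : it ∈ (dict.foldl (stepB cg) PySem.Dict.empty).items) :
    ∃ ws, Grp dict cg it.1 = it.2.2 :: ws ∧ it.2.1 = (ws.length : Int) + 1 := by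
  obtain ⟨t, v⟩ := it
  have hg := PySem.Dict.get?_of_mem_items _ hit (nodup_infoB dict cg)
  rw [infoB_get?, PySem.Dict.get?_empty] at hg
  cases hG : dict.filter (fun w => display_word_alt w cg == t) with
  | nil => rw [hG] at hg; exact absurd hg (by simp)
  | cons w ws =>
    rw [hG] at hg
    simp only [Option.some_inj] at hg
    exact ⟨ws, by rw [Grp, hG, ← hg], by rw [← hg]⟩

theorem score_eq (dict cg : List String) (t w : String) (ws : List String)
    (hG : Grp dict cg t = w :: ws) :
    dictFOM (Grp dict cg t) = ((ws.length : Int) + 1) * PySem.Str.len w := by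
  rw [hG, dictFOM]
  rw [if_neg (by simp)]
  simp [pysem]

-- the two selection loops march in step: A keeps the best group, B the best (tag, score)
theorem sel (dict cg : List String) (its : List (String × (Int × String)))
    (h : ∀ it ∈ its, dictFOM (Grp dict cg it.1) = it.2.1 * PySem.Str.len it.2.2) :
    ∀ (b : Option String × Int),
      dictFOM (match b.1 with | none => [] | some t => Grp dict cg t) = b.2 →
      (its.map (fun p => p.1)).foldl
          (fun L k => if dictFOM (Grp dict cg k) > dictFOM L then Grp dict cg k else L)
          (match b.1 with | none => [] | some t => Grp dict cg t)
        = (match (its.foldl (fun (best : Option String × Int) it =>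
              let s := it.2.1 * PySem.Str.len it.2.2
              if s > best.2 then (some it.1, s) else best) b).1 with
           | none => [] | some t => Grp dict cg t) := by
  induction its with
  | nil => intro b hb; rfl
  | cons it its ih =>
    intro b hb
    have hs := h it (by simp)
    simp only [List.map_cons, List.foldl_cons]
    rw [hs, hb]
    by_cases hgt : it.2.1 * PySem.Str.len it.2.2 > b.2
    · rw [if_pos hgt, if_pos hgt]
      exact ih (fun x hx => h x (List.mem_cons_of_mem _ hx))
        (some it.1, it.2.1 * PySem.Str.len it.2.2) (by simpa using hs)
    · rw [if_neg hgt, if_neg hgt]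
      exact ih (fun x hx => h x (List.mem_cons_of_mem _ hx)) b hb

-- ===== VERDICT (by name: the statement is the Claim_ definition above) =====
theorem narrow_words_spec : Claim_equal_narrow_words := by
  intro dict cg _
  show narrow_words dict cg = narrow_words_alt dict cg
  simp only [narrow_words, narrow_words_alt]
  rw [stepA_eq]
  rw [show (fun (d : PySem.Dict String (Int × String)) (w : String) =>
      let t := display_word_alt w cg
      let p := d.getD t ((0 : Int), w)
      d.insert t (p.1 + 1, p.2)) = stepB cg from rfl]
  have hbody : (fun (L : List String) (k : String) =>
      if dictFOM ((dict.foldl (fun d w => d.modify (keyf cg w) [] (fun g => g ++ [w])) PySem.Dict.empty).getD k []) > dictFOM L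
      then (dict.foldl (fun d w => d.modify (keyf cg w) [] (fun g => g ++ [w])) PySem.Dict.empty).getD k [] else L)
      = (fun L k => if dictFOM (Grp dict cg k) > dictFOM L then Grp dict cg k else L) := by
    funext L k
    rw [groupA]
  rw [hbody, keysA_eq,
    show (dict.foldl (stepB cg) PySem.Dict.empty).keys
       = ((dict.foldl (stepB cg) PySem.Dict.empty).items.map (fun p => p.1)) from rfl]
  have hsel := sel dict cg (dict.foldl (stepB cg) PySem.Dict.empty).items
    (fun it hit => by
      obtain ⟨ws, hG, hc⟩ := itemsB_spec dict cg it hit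
      rw [score_eq dict cg it.1 it.2.2 ws hG, hc])
    (none, 0) (by simp [dictFOM])
  exact hsel
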